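-- pv_equiv track=rewrite | github.com/philotuxo/Position-Annotated-BLE-RSSI-Dataset | lib/poses_preprocess.py | updateLists
-- ===== SOURCE A (Python) =====
-- def updateLists(listShow, listPos, listPosinC, listIds, listArr, listOri) :
--     indices = [i for i in range(len(listShow)) if listShow[i] == 1]
--     listShow = [listShow[i] for i in indices]
--     listPosinC = [listPosinC[i] for i in indices]
--     listPos = [listPos[i] for i in indices]
--     listOri = [listOri[i] for i in indices]
--     listArr = [listArr[i] for i in indices]
--     listIds = [listIds[i] for i in indices]
--
--     return listShow, listPos, listPosinC, listIds, listArr, listOri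
-- ===== SOURCE B (Python) =====
-- def updateLists(listShow, listPos, listPosinC, listIds, listArr, listOri):
--     rows = [r for r in zip(listShow, listPos, listPosinC, listIds, listArr, listOri)
--             if r[0] == 1]
--     if not rows:
--         return [], [], [], [], [], []
--     cols = tuple(list(col) for col in zip(*rows))
--     return cols
-- ===== Notes on version B (the rewrite author's own statement) =====
-- stated objective: alternative
-- what changed: B works row-wise: it builds one filtered list of 6-tuples (the rows with listShow element 1) and then transposes it back into six column lists with zip(*rows), instead of A's precomputed index list followed by six separate re-indexing comprehensions.
import Mathlib
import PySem

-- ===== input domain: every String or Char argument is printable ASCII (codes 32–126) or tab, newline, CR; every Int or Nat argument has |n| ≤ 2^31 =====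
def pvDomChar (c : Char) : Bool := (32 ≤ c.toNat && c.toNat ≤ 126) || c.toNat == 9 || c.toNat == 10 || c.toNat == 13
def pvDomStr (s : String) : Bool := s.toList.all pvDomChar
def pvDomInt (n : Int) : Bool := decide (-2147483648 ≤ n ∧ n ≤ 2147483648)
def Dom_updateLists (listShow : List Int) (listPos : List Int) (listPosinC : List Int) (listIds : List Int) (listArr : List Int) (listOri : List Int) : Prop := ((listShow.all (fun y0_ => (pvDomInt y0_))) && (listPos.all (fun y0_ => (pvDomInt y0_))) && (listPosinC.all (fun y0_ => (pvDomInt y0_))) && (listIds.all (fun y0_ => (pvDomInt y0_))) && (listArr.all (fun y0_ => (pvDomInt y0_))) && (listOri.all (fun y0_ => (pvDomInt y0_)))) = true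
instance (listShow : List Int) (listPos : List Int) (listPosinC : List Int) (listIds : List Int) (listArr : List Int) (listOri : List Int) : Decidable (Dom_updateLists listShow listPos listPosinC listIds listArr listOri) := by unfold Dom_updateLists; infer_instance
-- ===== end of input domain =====

-- B works row-wise: it filters the zipped 6-tuple rows with show == 1 and transposes them back
-- into six column lists, instead of A's index-list precomputation plus six re-indexing passes
-- (objective: alternative).

-- ===== PORT A =====
def updateLists (listShow : List Int) (listPos : List Int) (listPosinC : List Int) (listIds : List Int) (listArr : List Int) (listOri : List Int) : List Int × List Int × List Int × List Int × List Int × List Int :=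
  let indices := (PySem.List.pyRange 0 (listShow.length : Int) 1).filter (fun i => PySem.List.pyGetD listShow i 0 == 1)
  let listShow' := indices.map (fun i => PySem.List.pyGetD listShow i 0)
  let listPosinC' := indices.map (fun i => PySem.List.pyGetD listPosinC i 0)
  let listPos' := indices.map (fun i => PySem.List.pyGetD listPos i 0)
  let listOri' := indices.map (fun i => PySem.List.pyGetD listOri i 0)
  let listArr' := indices.map (fun i => PySem.List.pyGetD listArr i 0)
  let listIds' := indices.map (fun i => PySem.List.pyGetD listIds i 0)
  (listShow', listPos', listPosinC', listIds', listArr', listOri')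

-- ===== PORT B =====
-- zip over six lists, truncating at the shortest (Python's zip)
def pvZip6 : List Int → List Int → List Int → List Int → List Int → List Int → List (Int × Int × Int × Int × Int × Int)
  | x :: s, y :: p, z :: c, w :: i, u :: a, v :: o => (x, y, z, w, u, v) :: pvZip6 s p c i a o
  | _, _, _, _, _, _ => []

def updateLists_alt (listShow : List Int) (listPos : List Int) (listPosinC : List Int) (listIds : List Int) (listArr : List Int) (listOri : List Int) : List Int × List Int × List Int × List Int × List Int × List Int :=
  let rows := (pvZip6 listShow listPos listPosinC listIds listArr listOri).filter (fun r => r.1 == 1)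
  if rows = [] then ([], [], [], [], [], [])
  else
    -- zip(*rows): transpose the kept rows back into the six columns
    (rows.map (·.1), rows.map (·.2.1), rows.map (·.2.2.1),
     rows.map (·.2.2.2.1), rows.map (·.2.2.2.2.1), rows.map (·.2.2.2.2.2))

-- ===== PRECONDITION & SPEC =====
-- Pre_ excludes exactly the inputs on which A raises IndexError: some index i with listShow[i] == 1
-- is out of range for one of the other five lists.
def Pre_updateLists (listShow : List Int) (listPos : List Int) (listPosinC : List Int) (listIds : List Int) (listArr : List Int) (listOri : List Int) : Prop :=
  ∀ n : Nat, n < listShow.length → listShow.getD n 0 = 1 →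
    n < listPos.length ∧ n < listPosinC.length ∧ n < listIds.length ∧ n < listArr.length ∧ n < listOri.length
instance (listShow : List Int) (listPos : List Int) (listPosinC : List Int) (listIds : List Int) (listArr : List Int) (listOri : List Int) : Decidable (Pre_updateLists listShow listPos listPosinC listIds listArr listOri) := by unfold Pre_updateLists; infer_instance

def pvWitness_updateLists : List Int × List Int × List Int × List Int × List Int × List Int :=
  ([1, 0, 1], [4, 5, 6], [7, 8, 9], [10, 11, 12], [13, 14, 15], [16, 17, 18])

def Spec_updateLists (listShow : List Int) (listPos : List Int) (listPosinC : List Int) (listIds : List Int) (listArr : List Int) (listOri : List Int) (out : List Int × List Int × List Int × List Int × List Int × List Int) : Prop := out = updateLists_alt listShow listPos listPosinC listIds listArr listOri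
instance (listShow : List Int) (listPos : List Int) (listPosinC : List Int) (listIds : List Int) (listArr : List Int) (listOri : List Int) (out : List Int × List Int × List Int × List Int × List Int × List Int) : Decidable (Spec_updateLists listShow listPos listPosinC listIds listArr listOri out) := by unfold Spec_updateLists; infer_instance

-- ===== CLAIM (what is proved, stated in full; the proofs are below) =====
def Claim_equal_updateLists : Prop := ∀ (listShow : List Int) (listPos : List Int) (listPosinC : List Int) (listIds : List Int) (listArr : List Int) (listOri : List Int), Dom_updateLists listShow listPos listPosinC listIds listArr listOri → Pre_updateLists listShow listPos listPosinC listIds listArr listOri → Spec_updateLists listShow listPos listPosinC listIds listArr listOri (updateLists listShow listPos listPosinC listIds listArr listOri)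

-- ===== LEMMAS AND PROOFS =====

-- selected indices, in Nat form
def pvIdxN (s : List Int) : List Nat := (List.range s.length).filter (fun n => s.getD n 0 == 1)

lemma pvIdx_eq_idxN (s : List Int) :
    (PySem.List.pyRange 0 (s.length : Int) 1).filter (fun i => PySem.List.pyGetD s i 0 == 1)
      = (pvIdxN s).map (fun n : Nat => (n : Int)) := by
  have hp : ((fun i => PySem.List.pyGetD s i 0 == 1) ∘ (fun k : Nat => (k : Int)))
      = fun n => s.getD n 0 == 1 := by
    funext n
    simp
  rw [PySem.List.pyRange_zero_nat, List.filter_map, hp, pvIdxN]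

lemma pvMap_idxN_cast (s L : List Int) :
    ((pvIdxN s).map (fun n : Nat => (n : Int))).map (fun i => PySem.List.pyGetD L i 0)
      = (pvIdxN s).map (fun n => L.getD n 0) := by
  induction pvIdxN s with
  | nil => rfl
  | cons a l ih =>
    simp only [List.map_cons, PySem.List.pyGetD_natCast]
    rw [ih]

lemma pvIdxN_cons (x : Int) (xs : List Int) :
    pvIdxN (x :: xs) = (if x == 1 then [0] else []) ++ (pvIdxN xs).map (· + 1) := by
  unfold pvIdxN
  rw [List.length_cons, List.range_succ_eq_map, List.filter_cons, List.filter_map]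
  by_cases h : x == 1 <;> simp [h, Function.comp_def]

-- B's value is the six projection maps of the kept rows, whether or not rows is empty
lemma pvAlt_char (s p c ids arr ori : List Int) :
    updateLists_alt s p c ids arr ori
      = (((pvZip6 s p c ids arr ori).filter (fun r => r.1 == 1)).map (·.1),
         ((pvZip6 s p c ids arr ori).filter (fun r => r.1 == 1)).map (·.2.1),
         ((pvZip6 s p c ids arr ori).filter (fun r => r.1 == 1)).map (·.2.2.1),
         ((pvZip6 s p c ids arr ori).filter (fun r => r.1 == 1)).map (·.2.2.2.1),
         ((pvZip6 s p c ids arr ori).filter (fun r => r.1 == 1)).map (·.2.2.2.2.1),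
         ((pvZip6 s p c ids arr ori).filter (fun r => r.1 == 1)).map (·.2.2.2.2.2)) := by
  unfold updateLists_alt
  by_cases h : (pvZip6 s p c ids arr ori).filter (fun r => r.1 == 1) = []
  · simp [h]
  · simp [h]

lemma pvIdxN_nil_of_short (x : Int) (xs : List Int)
    (h : ∀ n : Nat, n < (x :: xs).length → (x :: xs).getD n 0 = 1 → False) :
    pvIdxN (x :: xs) = [] := by
  unfold pvIdxN
  rw [List.filter_eq_nil_iff]
  intro n hn
  simp only [List.mem_range] at hn
  simpa using fun hx => h n hn hx

lemma pvZip6_nil2 (s c i a o : List Int) : pvZip6 s [] c i a o = [] := by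
  cases s <;> rfl

lemma pvZip6_nil3 (s p i a o : List Int) : pvZip6 s p [] i a o = [] := by
  cases s <;> cases p <;> rfl

lemma pvZip6_nil4 (s p c a o : List Int) : pvZip6 s p c [] a o = [] := by
  cases s <;> cases p <;> cases c <;> rfl

lemma pvZip6_nil5 (s p c i o : List Int) : pvZip6 s p c i [] o = [] := by
  cases s <;> cases p <;> cases c <;> cases i <;> rfl

lemma pvZip6_nil6 (s p c i a : List Int) : pvZip6 s p c i a [] = [] := by
  cases s <;> cases p <;> cases c <;> cases i <;> cases a <;> rfl

lemma pvZipChar (s p c ids arr ori : List Int)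
    (hpre : Pre_updateLists s p c ids arr ori) :
    ((pvZip6 s p c ids arr ori).filter (fun t => t.1 == 1)).map (·.1)
        = (pvIdxN s).map (fun n => s.getD n 0) ∧
      ((pvZip6 s p c ids arr ori).filter (fun t => t.1 == 1)).map (·.2.1)
        = (pvIdxN s).map (fun n => p.getD n 0) ∧
      ((pvZip6 s p c ids arr ori).filter (fun t => t.1 == 1)).map (·.2.2.1)
        = (pvIdxN s).map (fun n => c.getD n 0) ∧
      ((pvZip6 s p c ids arr ori).filter (fun t => t.1 == 1)).map (·.2.2.2.1)
        = (pvIdxN s).map (fun n => ids.getD n 0) ∧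
      ((pvZip6 s p c ids arr ori).filter (fun t => t.1 == 1)).map (·.2.2.2.2.1)
        = (pvIdxN s).map (fun n => arr.getD n 0) ∧
      ((pvZip6 s p c ids arr ori).filter (fun t => t.1 == 1)).map (·.2.2.2.2.2)
        = (pvIdxN s).map (fun n => ori.getD n 0) := by
  induction s generalizing p c ids arr ori with
  | nil =>
    simp [pvZip6, pvIdxN]
  | cons x xs ih =>
    match p, c, ids, arr, ori with
    | y :: p', z :: c', w :: ids', u :: arr', v :: ori' =>
      have hpre' : Pre_updateLists xs p' c' ids' arr' ori' := by
        intro n hn hv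
        have h := hpre (n + 1) (by simpa using Nat.succ_lt_succ hn) (by simpa using hv)
        simp only [List.length_cons] at h
        omega
      obtain ⟨g1, g2, g3, g4, g5, g6⟩ := ih p' c' ids' arr' ori' hpre'
      rw [pvZip6, pvIdxN_cons]
      by_cases h : x == 1
      · simp [h, g1, g2, g3, g4, g5, g6]
      · simp [h, g1, g2, g3, g4, g5, g6]
    | [], c, ids, arr, ori =>
      have hnil := pvIdxN_nil_of_short x xs
        (fun n hn hv => by obtain ⟨h1, _, _, _, _⟩ := hpre n hn hv; simp at h1)
      refine ⟨?_, ?_, ?_, ?_, ?_, ?_⟩ <;> simp [hnil, pvZip6_nil2]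
    | p, [], ids, arr, ori =>
      have hnil := pvIdxN_nil_of_short x xs
        (fun n hn hv => by obtain ⟨_, h2, _, _, _⟩ := hpre n hn hv; simp at h2)
      refine ⟨?_, ?_, ?_, ?_, ?_, ?_⟩ <;> simp [hnil, pvZip6_nil3]
    | p, c, [], arr, ori =>
      have hnil := pvIdxN_nil_of_short x xs
        (fun n hn hv => by obtain ⟨_, _, h3, _, _⟩ := hpre n hn hv; simp at h3)
      refine ⟨?_, ?_, ?_, ?_, ?_, ?_⟩ <;> simp [hnil, pvZip6_nil4]
    | p, c, ids, [], ori =>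
      have hnil := pvIdxN_nil_of_short x xs
        (fun n hn hv => by obtain ⟨_, _, _, h4, _⟩ := hpre n hn hv; simp at h4)
      refine ⟨?_, ?_, ?_, ?_, ?_, ?_⟩ <;> simp [hnil, pvZip6_nil5]
    | p, c, ids, arr, [] =>
      have hnil := pvIdxN_nil_of_short x xs
        (fun n hn hv => by obtain ⟨_, _, _, _, h5⟩ := hpre n hn hv; simp at h5)
      refine ⟨?_, ?_, ?_, ?_, ?_, ?_⟩ <;> simp [hnil, pvZip6_nil6]

lemma pvMain (s p c ids arr ori : List Int)
    (hpre : Pre_updateLists s p c ids arr ori) :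
    updateLists s p c ids arr ori = updateLists_alt s p c ids arr ori := by
  unfold updateLists
  rw [pvAlt_char]
  simp only []
  rw [pvIdx_eq_idxN, pvMap_idxN_cast, pvMap_idxN_cast, pvMap_idxN_cast, pvMap_idxN_cast,
      pvMap_idxN_cast, pvMap_idxN_cast]
  obtain ⟨h1, h2, h3, h4, h5, h6⟩ := pvZipChar s p c ids arr ori hpre
  rw [h1, h2, h3, h4, h5, h6]

-- ===== VERDICT (by name: the statement is the Claim_ definition above) =====
theorem updateLists_spec : Claim_equal_updateLists := by
  intro s p c ids arr ori _ hpre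
  unfold Spec_updateLists
  exact pvMain s p c ids arr ori hpre
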